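-- pv_equiv track=rewrite | github.com/fritzo/pomagma | src/reducer/util.py | trool_all
-- ===== SOURCE A (Python) =====
-- def trool_all(args):
--     """Combine according to:
--
--           | None  True  False
--     ------+------------------
--      None | None  None  False
--      True | None  True  False
--     False | False False False
--
--     """
--     result = True
--     for arg in args:
--         if arg is False:
--             return False
--         elif arg is None:
--             result = None
--     return result
-- ===== SOURCE B (Python) =====
-- def trool_all(args):
--     args = list(args)
--     if any(a is False for a in args):
--         return False
--     if any(a is None for a in args):
--         return None
--     return True
-- ===== Notes on version B (the rewrite author's own statement) =====
-- stated objective: idiomatic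
-- what changed: Replaced the single early-exit loop carrying a result accumulator by two any() identity scans: first check for a False, then for a None, else True.
import Mathlib
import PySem

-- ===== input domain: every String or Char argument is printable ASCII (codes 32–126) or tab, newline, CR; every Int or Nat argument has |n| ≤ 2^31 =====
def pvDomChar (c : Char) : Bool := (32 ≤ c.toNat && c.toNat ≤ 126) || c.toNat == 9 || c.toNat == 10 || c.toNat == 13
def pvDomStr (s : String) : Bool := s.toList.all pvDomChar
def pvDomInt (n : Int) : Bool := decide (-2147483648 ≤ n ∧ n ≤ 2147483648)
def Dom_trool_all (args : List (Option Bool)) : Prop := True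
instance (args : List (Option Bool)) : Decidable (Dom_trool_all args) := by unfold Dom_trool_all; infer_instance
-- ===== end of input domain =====

-- B replaces A's early-exit accumulator loop by two any() identity scans (check-False then check-None); same cost, more idiomatic.


-- ===== PORT A =====
-- Two any() identity scans instead of A's early-exit accumulator loop; same behaviour.
def trool_allGo (result : Option Bool) : List (Option Bool) → Option Bool
  | [] => result
  | arg :: rest =>
    if arg = some false then some false
    else if arg = none then trool_allGo none rest
    else trool_allGo result rest

def trool_all (args : List (Option Bool)) : Option Bool :=
  trool_allGo (some true) args

-- ===== PORT B =====
def trool_all_alt (args : List (Option Bool)) : Option Bool :=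
  if args.any (fun a => a = some false) then some false
  else if args.any (fun a => a = none) then none
  else some true


-- ===== PRECONDITION & SPEC =====
def Spec_trool_all (args : List (Option Bool)) (out : Option Bool) : Prop := out = trool_all_alt args
instance (args : List (Option Bool)) (out : Option Bool) : Decidable (Spec_trool_all args out) := by unfold Spec_trool_all; infer_instance

-- ===== CLAIM (what is proved, stated in full; the proofs are below) =====
def Claim_equal_trool_all : Prop := ∀ (args : List (Option Bool)), Dom_trool_all args → Spec_trool_all args (trool_all args)

-- ===== LEMMAS AND PROOFS =====
lemma trool_allGo_eq (r : Option Bool) (args : List (Option Bool)) (hr : r = some true ∨ r = none) :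
    trool_allGo r args =
      (if args.any (fun a => a = some false) then some false
       else if args.any (fun a => a = none) then none
       else r) := by
  induction args generalizing r with
  | nil => simp [trool_allGo]
  | cons a rest ih =>
    rcases Option.eq_none_or_eq_some a with h | ⟨b, h⟩
    · subst h; simp [trool_allGo, ih none (Or.inr rfl)]
    · cases b <;> subst h <;> simp [trool_allGo, ih r hr]

-- ===== VERDICT (by name: the statement is the Claim_ definition above) =====
theorem trool_all_spec : Claim_equal_trool_all := by
  intro args _
  unfold Spec_trool_all trool_all trool_all_alt
  rw [trool_allGo_eq _ _ (Or.inl rfl)]
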